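-- pv_equiv track=rewrite | github.com/FilippoPisello/advent-of-code | advent_of_code/y2024/day12/max/solution.py | _make_unique_regions
-- ===== SOURCE A (Python) =====
-- from collections import deque
--
-- def _make_unique_regions(grid):
--
--     def is_valid(x, y, char):
--         return 0 <= x < len(grid) and 0 <= y < len(grid[0]) and grid[x][y] == char and (x, y) not in visited
--
--     def flood_fill(x, y, char, replacement):
--         queue = deque([(x, y)])
--         visited.add((x, y))
--         grid[x][y] = replacement
--
--         while queue:
--             cx, cy = queue.popleft()
--             for dx, dy in [(-1, 0), (1, 0), (0, -1), (0, 1)]: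
--                 nx, ny = cx + dx, cy + dy
--                 if is_valid(nx, ny, char):
--                     visited.add((nx, ny))
--                     grid[nx][ny] = replacement
--                     queue.append((nx, ny))
--
--     visited = set()
--     unique_counter = {}
--
--     for i in range(len(grid)):
--         for j in range(len(grid[0])):
--             if (i, j) not in visited:
--                 char = grid[i][j]
--                 if char not in unique_counter:
--                     unique_counter[char] = 1
--                 else:
--                     unique_counter[char] += 1
--
--                 replacement = char if unique_counter[char] == 1 else char + str(unique_counter[char])
--                 flood_fill(i, j, char, replacement)
--
--     return grid
-- ===== SOURCE B (Python) =====
-- def _make_unique_regions(grid):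
--     visited = set()
--     unique_counter = {}
--
--     def fill(x, y, char, replacement):
--         visited.add((x, y))
--         grid[x][y] = replacement
--         for nx, ny in ((x - 1, y), (x + 1, y), (x, y - 1), (x, y + 1)):
--             if (0 <= nx < len(grid) and 0 <= ny < len(grid[0])
--                     and grid[nx][ny] == char and (nx, ny) not in visited):
--                 fill(nx, ny, char, replacement)
--
--     for i in range(len(grid)):
--         for j in range(len(grid[0])):
--             if (i, j) not in visited:
--                 char = grid[i][j]
--                 unique_counter[char] = unique_counter.get(char, 0) + 1
--                 n = unique_counter[char]
--                 replacement = char if n == 1 else char + str(n)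
--                 fill(i, j, char, replacement)
--     return grid
-- ===== Notes on version B (the rewrite author's own statement) =====
-- stated objective: simpler
-- what changed: The deque-based BFS flood fill is replaced by a recursive DFS helper (mark, write, recurse on the four valid neighbours), and the counter update uses dict.get instead of an if/else branch; traversal order inside a region changes but every region still gets the same single replacement.
import Mathlib
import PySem

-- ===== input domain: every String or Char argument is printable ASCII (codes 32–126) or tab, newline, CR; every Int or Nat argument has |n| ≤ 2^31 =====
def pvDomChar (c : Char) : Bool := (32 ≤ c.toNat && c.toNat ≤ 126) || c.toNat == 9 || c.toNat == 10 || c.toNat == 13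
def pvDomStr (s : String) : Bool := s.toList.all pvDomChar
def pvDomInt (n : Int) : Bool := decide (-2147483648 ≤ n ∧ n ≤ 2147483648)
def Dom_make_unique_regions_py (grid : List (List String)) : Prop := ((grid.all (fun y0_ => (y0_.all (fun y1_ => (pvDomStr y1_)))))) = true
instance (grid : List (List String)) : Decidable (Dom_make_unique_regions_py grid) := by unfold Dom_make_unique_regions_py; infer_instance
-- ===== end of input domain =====

-- B replaces A's deque-based BFS flood fill by a recursive DFS flood fill (same outer scan, counter and
-- replacement rule); both mutate the grid argument in place in Python — the equivalence proved here is
-- about the returned grid value.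

-- shared helpers: both Pythons read grid[x][y] / assign grid[x][y] identically (reads are guarded by the
-- bounds checks both programs make; pyGet? is exact there, the .getD defaults are never reached under Pre_)
def pvGetCell (g : List (List String)) (x y : Int) : String :=
  (PySem.List.pyGet? ((PySem.List.pyGet? g x).getD []) y).getD ""

def pvSetCell (g : List (List String)) (x y : Int) (v : String) : List (List String) :=
  g.set x.toNat ((g.getD x.toNat []).set y.toNat v)

-- ===== PORT A =====
def pvIsValid (g : List (List String)) (visited : PySem.Set (Int × Int)) (x y : Int) (char : String) : Bool :=
  decide (0 ≤ x) && decide (x < (g.length : Int)) && decide (0 ≤ y) && decide (y < ((g.headD []).length : Int))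
    && (pvGetCell g x y == char) && !(PySem.Set.contains visited (x, y))

-- the `while queue:` loop; fuel only makes it total (each iteration pops one cell, every push marks a
-- fresh cell visited, so rows*cols+1 steps always suffice — proved in pvBfs_fuel lemmas below)
def pvBfsLoop (char repl : String) :
    Nat → List (Int × Int) → PySem.Set (Int × Int) → List (List String) →
    PySem.Set (Int × Int) × List (List String)
  | 0, _, visited, g => (visited, g)
  | _ + 1, [], visited, g => (visited, g)
  | fuel + 1, c :: queue, visited, g =>
    let st := [((-1 : Int), (0 : Int)), (1, 0), (0, -1), (0, 1)].foldl
      (fun (st : List (Int × Int) × PySem.Set (Int × Int) × List (List String)) d =>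
        let n : Int × Int := (c.1 + d.1, c.2 + d.2)
        if pvIsValid st.2.2 st.2.1 n.1 n.2 char then
          (st.1 ++ [n], PySem.Set.add st.2.1 n, pvSetCell st.2.2 n.1 n.2 repl)
        else st)
      (queue, visited, g)
    pvBfsLoop char repl fuel st.1 st.2.1 st.2.2

def pvFloodFill (x y : Int) (char repl : String) (visited : PySem.Set (Int × Int))
    (g : List (List String)) : PySem.Set (Int × Int) × List (List String) :=
  pvBfsLoop char repl (g.length * (g.headD []).length + 1)
    [(x, y)] (PySem.Set.add visited (x, y)) (pvSetCell g x y repl)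

def pvBodyA (st : PySem.Set (Int × Int) × PySem.Dict String Int × List (List String)) (i j : Int) :
    PySem.Set (Int × Int) × PySem.Dict String Int × List (List String) :=
  if PySem.Set.contains st.1 (i, j) then st
  else
    let char := pvGetCell st.2.2 i j
    let counter := if !(PySem.Dict.contains st.2.1 char) then PySem.Dict.insert st.2.1 char 1
                   else PySem.Dict.insert st.2.1 char (PySem.Dict.getD st.2.1 char 0 + 1)
    let cnt := PySem.Dict.getD counter char 0
    let repl := if cnt == 1 then char else char ++ PySem.Int.toStr cnt
    let r := pvFloodFill i j char repl st.1 st.2.2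
    (r.1, counter, r.2)

def make_unique_regions_py (grid : List (List String)) : List (List String) :=
  ((PySem.List.pyRange 0 grid.length 1).foldl
    (fun st i =>
      (PySem.List.pyRange 0 ((st.2.2.headD []).length : Int) 1).foldl (fun st' j => pvBodyA st' i j) st)
    (PySem.Set.empty, PySem.Dict.empty, grid)).2.2

-- ===== PORT B =====
-- recursive DFS `fill`: mark (x,y), write the replacement, recurse on each valid neighbour
-- (fuel only makes the recursion total; rows*cols+1 always suffices, see pvDfs_post)
def pvDfs (char repl : String) :
    Nat → Int → Int → PySem.Set (Int × Int) → List (List String) →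
    PySem.Set (Int × Int) × List (List String)
  | 0, _, _, visited, g => (visited, g)
  | fuel + 1, x, y, visited, g =>
    [(x - 1, y), (x + 1, y), (x, y - 1), (x, y + 1)].foldl
      (fun (st : PySem.Set (Int × Int) × List (List String)) n =>
        if decide (0 ≤ n.1) && decide (n.1 < (st.2.length : Int)) && decide (0 ≤ n.2)
            && decide (n.2 < ((st.2.headD []).length : Int))
            && (pvGetCell st.2 n.1 n.2 == char) && !(PySem.Set.contains st.1 n) then
          pvDfs char repl fuel n.1 n.2 st.1 st.2
        else st)
      (PySem.Set.add visited (x, y), pvSetCell g x y repl)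

def pvBodyB (st : PySem.Set (Int × Int) × PySem.Dict String Int × List (List String)) (i j : Int) :
    PySem.Set (Int × Int) × PySem.Dict String Int × List (List String) :=
  if PySem.Set.contains st.1 (i, j) then st
  else
    let char := pvGetCell st.2.2 i j
    let counter := PySem.Dict.insert st.2.1 char (PySem.Dict.getD st.2.1 char 0 + 1)
    let n := PySem.Dict.getD counter char 0
    let repl := if n == 1 then char else char ++ PySem.Int.toStr n
    let r := pvDfs char repl (st.2.2.length * (st.2.2.headD []).length + 1) i j st.1 st.2.2
    (r.1, counter, r.2)

def make_unique_regions_py_alt (grid : List (List String)) : List (List String) :=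
  ((PySem.List.pyRange 0 grid.length 1).foldl
    (fun st i =>
      (PySem.List.pyRange 0 ((st.2.2.headD []).length : Int) 1).foldl (fun st' j => pvBodyB st' i j) st)
    (PySem.Set.empty, PySem.Dict.empty, grid)).2.2

-- ===== PRECONDITION & SPEC =====
-- Pre_ excludes exactly the ragged grids in which some row is shorter than the first row: there the
-- Python A (and the Python B alike) raises IndexError reading grid[i][j] for a j < len(grid[0]) beyond
-- that row's end.
def Pre_make_unique_regions_py (grid : List (List String)) : Prop :=
  ∀ row ∈ grid, (grid.headD []).length ≤ row.length

instance (grid : List (List String)) : Decidable (Pre_make_unique_regions_py grid) := by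
  unfold Pre_make_unique_regions_py; infer_instance

def pvWitness_make_unique_regions_py : List (List String) := [["a", "b"], ["a", "a"]]

def Spec_make_unique_regions_py (grid : List (List String)) (out : List (List String)) : Prop :=
  out = make_unique_regions_py_alt grid
instance (grid : List (List String)) (out : List (List String)) : Decidable (Spec_make_unique_regions_py grid out) := by
  unfold Spec_make_unique_regions_py; infer_instance

-- ===== CLAIM (what is proved, stated in full; the proofs are below) =====
def Claim_equal_make_unique_regions_py : Prop :=
  ∀ (grid : List (List String)), Dom_make_unique_regions_py grid →
    Pre_make_unique_regions_py grid →
    Spec_make_unique_regions_py grid (make_unique_regions_py grid)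

-- ===== LEMMAS AND PROOFS =====

-- abstract view of the grid used only by the proofs
def pvCellAt (g : List (List String)) (i j : Nat) : Option String := (g[i]?).bind (fun r => r[j]?)

def pvRowLen (g : List (List String)) (i : Nat) : Option Nat := g[i]?.map List.length

def pvOk (gs : List (List String)) (char : String) (c : Int × Int) : Prop :=
  0 ≤ c.1 ∧ c.1 < (gs.length : Int) ∧ 0 ≤ c.2 ∧ c.2 < ((gs.headD []).length : Int) ∧
    pvGetCell gs c.1 c.2 = char

def pvAdj (c n : Int × Int) : Prop :=
  n = (c.1 - 1, c.2) ∨ n = (c.1 + 1, c.2) ∨ n = (c.1, c.2 - 1) ∨ n = (c.1, c.2 + 1)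

-- cells reachable from s through unvisited char-cells of the fill-start grid gs
inductive pvReach (gs : List (List String)) (char : String) (V : List (Int × Int)) :
    (Int × Int) → (Int × Int) → Prop
  | refl (s : Int × Int) : pvReach gs char V s s
  | step {s c n : Int × Int} : pvReach gs char V s c → pvAdj c n → pvOk gs char n → n ∉ V →
      pvReach gs char V s n

def pvAllCells (gs : List (List String)) : List (Int × Int) :=
  (PySem.List.pyRange 0 gs.length 1).flatMap
    (fun i => (PySem.List.pyRange 0 (gs.headD []).length 1).map (fun j => (i, j)))

def pvU (gs : List (List String)) (V : List (Int × Int)) : Nat :=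
  ((pvAllCells gs).filter (fun c => decide (c ∉ V))).length

-- the state of a flood fill relative to the fill-start grid gs and fill-start visited Vs:
-- shape unchanged, every cell of V \ Vs holds repl, every other cell is as in gs
def pvGridInv (gs : List (List String)) (Vs : List (Int × Int)) (repl : String)
    (G : List (List String)) (V : List (Int × Int)) : Prop :=
  G.length = gs.length ∧ (∀ i, pvRowLen G i = pvRowLen gs i) ∧
  ∀ i j : Nat, pvCellAt G i j =
    if ((i : Int), (j : Int)) ∈ V ∧ ((i : Int), (j : Int)) ∉ Vs then
      (pvCellAt gs i j).map (fun _ => repl)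
    else pvCellAt gs i j

def pvFillSpec (V : List (Int × Int)) (G : List (List String)) (char repl : String)
    (s : Int × Int) (r : List (Int × Int) × List (List String)) : Prop :=
  (∀ c, c ∈ r.1 ↔ c ∈ V ∨ pvReach G char V s c) ∧ pvGridInv G V repl r.2 r.1

-- ---- basic lemmas (structure; proofs below) ----


lemma pvSet_getElem? {α : Type} (l : List α) (a : Nat) (v : α) (j : Nat) :
    (l.set a v)[j]? = if a = j then (l[j]?).map (fun _ => v) else l[j]? := by
  by_cases h : a = j
  · subst h
    rcases Nat.lt_or_ge a l.length with hl | hl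
    · simp [List.getElem?_eq_getElem hl, hl]
    · simp [List.getElem?_set, Nat.not_lt.2 hl]
  · simp [List.getElem?_set, h]

lemma pvFilter_mono {α : Type} (l : List α) (p q : α → Bool) (h : ∀ a, q a = true → p a = true) :
    (l.filter q).length ≤ (l.filter p).length := by
  induction l with
  | nil => simp
  | cons x t ih =>
    cases hq : q x
    · cases hp : p x <;> simp [List.filter_cons, hq, hp] <;> omega
    · simp [List.filter_cons, hq, h x hq]; omega

lemma pvFilter_lt {α : Type} (l : List α) (p q : α → Bool) (h : ∀ a, q a = true → p a = true)
    (a : α) (hal : a ∈ l) (hpa : p a = true) (hqa : q a = false) :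
    (l.filter q).length < (l.filter p).length := by
  induction l with
  | nil => cases hal
  | cons x t ih =>
    rcases List.mem_cons.1 hal with rfl | hat
    · simp only [List.filter_cons, hpa, hqa]
      simpa using Nat.lt_succ_of_le (pvFilter_mono t p q h)
    · cases hq : q x
      · cases hp : p x
        · simp only [List.filter_cons, hq, hp]
          simpa using ih hat
        · simp only [List.filter_cons, hq, hp]
          simpa using Nat.lt_succ_of_lt (ih hat)
      · simp only [List.filter_cons, hq, h x hq]
        simpa using ih hat

lemma pvCellAt_set (g : List (List String)) (x y : Int) (v : String) (i j : Nat)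
    (hx : 0 ≤ x) (hy : 0 ≤ y) :
    pvCellAt (pvSetCell g x y v) i j =
      if x.toNat = i ∧ y.toNat = j then (pvCellAt g i j).map (fun _ => v) else pvCellAt g i j := by
  unfold pvCellAt pvSetCell
  rw [List.getD_eq_getElem?_getD, pvSet_getElem?]
  by_cases hxi : x.toNat = i
  · subst hxi
    cases hg : g[x.toNat]? with
    | none => by_cases hyj : y.toNat = j <;> simp [hyj]
    | some r =>
      by_cases hyj : y.toNat = j
      · subst hyj
        simp [pvSet_getElem?, hg]
      · simp [pvSet_getElem?, hg, hyj]
  · simp [hxi]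

lemma pvRowLen_set (g : List (List String)) (x y : Int) (v : String) (i : Nat) :
    pvRowLen (pvSetCell g x y v) i = pvRowLen g i := by
  unfold pvRowLen pvSetCell
  rw [pvSet_getElem?]
  by_cases hxi : x.toNat = i
  · subst hxi
    cases hg : g[x.toNat]? with
    | none => simp
    | some r =>
      simp [List.getD_eq_getElem?_getD, hg]
  · rw [if_neg hxi]

lemma pvLen_set (g : List (List String)) (x y : Int) (v : String) :
    (pvSetCell g x y v).length = g.length := by
  simp [pvSetCell]

lemma pvGetCell_eq (g : List (List String)) (x y : Int) (hx : 0 ≤ x) (hy : 0 ≤ y) :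
    pvGetCell g x y = (pvCellAt g x.toNat y.toNat).getD "" := by
  unfold pvGetCell pvCellAt
  have h1 : PySem.List.pyGet? g x = g[x.toNat]? := PySem.List.pyGet?_of_nonneg g hx
  rw [h1]
  cases hg : g[x.toNat]? with
  | none =>
    have h2 : PySem.List.pyGet? ([] : List String) y = ([] : List String)[y.toNat]? :=
      PySem.List.pyGet?_of_nonneg [] hy
    simp [h2]
  | some r =>
    have h2 : PySem.List.pyGet? r y = r[y.toNat]? := PySem.List.pyGet?_of_nonneg r hy
    simp [h2]

lemma pvHead_len (g : List (List String)) : (g.headD []).length = (pvRowLen g 0).getD 0 := by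
  cases g <;> simp [pvRowLen]

-- ---- pvReach lemmas ----

lemma pvReach_anti {gs char V W s d} (h : ∀ c : Int × Int, c ∈ V → c ∈ W) :
    pvReach gs char W s d → pvReach gs char V s d := by
  intro hr
  induction hr with
  | refl => exact .refl _
  | step hr ha ho hn ih => exact .step ih ha ho (fun hv => hn (h _ hv))

lemma pvReach_congr {gs char V W s d} (h : ∀ c : Int × Int, c ∈ V ↔ c ∈ W) :
    pvReach gs char V s d ↔ pvReach gs char W s d := by
  exact ⟨pvReach_anti (fun c hc => (h c).2 hc), pvReach_anti (fun c hc => (h c).1 hc)⟩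

lemma pvReach_prepend {gs char V s n d} (ha : pvAdj s n) (ho : pvOk gs char n) (hn : n ∉ V) :
    pvReach gs char V n d → pvReach gs char V s d := by
  intro hr
  induction hr with
  | refl => exact .step (.refl s) ha ho hn
  | step hr ha2 ho2 hn2 ih => exact .step ih ha2 ho2 hn2

lemma pvReach_subset_of_closed {gs char V s} {W : List (Int × Int)}
    (hs : s ∈ W) (hsV : s ∉ V)
    (hcl : ∀ d ∈ W, d ∉ V → ∀ n, pvAdj d n → pvOk gs char n → n ∉ V → n ∈ W) :
    ∀ d, pvReach gs char V s d → d ∈ W ∧ d ∉ V := by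
  intro d hr
  induction hr with
  | refl => exact ⟨hs, hsV⟩
  | step hr ha ho hn ih => exact ⟨hcl _ ih.1 ih.2 _ ha ho hn, hn⟩

-- ---- counting lemmas ----

lemma pvMem_allCells (gs : List (List String)) (c : Int × Int) :
    c ∈ pvAllCells gs ↔
      0 ≤ c.1 ∧ c.1 < (gs.length : Int) ∧ 0 ≤ c.2 ∧ c.2 < ((gs.headD []).length : Int) := by
  unfold pvAllCells
  simp only [List.mem_flatMap, List.mem_map, PySem.List.mem_pyRange_one]
  constructor
  · rintro ⟨i, hi, j, hj, rfl⟩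
    exact ⟨hi.1, hi.2, hj.1, hj.2⟩
  · rintro ⟨h1, h2, h3, h4⟩
    exact ⟨c.1, ⟨h1, h2⟩, c.2, ⟨h3, h4⟩, rfl⟩

lemma pvU_anti (gs : List (List String)) {V W : List (Int × Int)}
    (h : ∀ c : Int × Int, c ∈ V → c ∈ W) : pvU gs W ≤ pvU gs V := by
  exact pvFilter_mono _ _ _ (by intro a ha; simp only [decide_eq_true_eq] at *; exact fun hv => ha (h a hv))

lemma pvU_lt (gs : List (List String)) {V : List (Int × Int)} {c : Int × Int}
    (hc : c ∈ pvAllCells gs) (hcv : c ∉ V) : pvU gs (PySem.Set.add V c) < pvU gs V := by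
  refine pvFilter_lt _ _ _ ?_ c hc ?_ ?_
  · intro a ha
    simp only [decide_eq_true_eq, PySem.Set.mem_add] at *
    exact fun hv => ha (Or.inl hv)
  · simpa using hcv
  · simp [PySem.Set.mem_add]

lemma pvU_le (gs : List (List String)) (V : List (Int × Int)) :
    pvU gs V ≤ gs.length * (gs.headD []).length := by
  unfold pvU
  calc ((pvAllCells gs).filter _).length ≤ (pvAllCells gs).length := List.length_filter_le _ _
    _ = gs.length * (gs.headD []).length := by
        simp [pvAllCells, List.length_flatMap, List.map_const', List.sum_replicate,
          smul_eq_mul, PySem.List.length_pyRange_one]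

-- ---- gridInv lemmas ----

lemma pvGridInv_self (gs : List (List String)) (V : List (Int × Int)) (repl : String) :
    pvGridInv gs V repl gs V := by
  refine ⟨rfl, fun i => rfl, fun i j => ?_⟩
  rw [if_neg]
  rintro ⟨h1, h2⟩
  exact h2 h1

lemma pvGridInv_add {gs Vs repl G V} {c : Int × Int}
    (hinv : pvGridInv gs Vs repl G V) (hVs : ∀ x ∈ Vs, x ∈ V)
    (hc : c ∉ V) (h0x : 0 ≤ c.1) (h0y : 0 ≤ c.2) :
    pvGridInv gs Vs repl (pvSetCell G c.1 c.2 repl) (PySem.Set.add V c) := by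
  obtain ⟨hlen, hrow, hcell⟩ := hinv
  refine ⟨(pvLen_set _ _ _ _).trans hlen, fun i => (pvRowLen_set _ _ _ _ _).trans (hrow i),
    fun i j => ?_⟩
  rw [pvCellAt_set _ _ _ _ _ _ h0x h0y]
  have hc1 : ((c.1.toNat : Int), (c.2.toNat : Int)) = c := by
    ext <;> simp [Int.toNat_of_nonneg h0x, Int.toNat_of_nonneg h0y]
  by_cases hij : c.1.toNat = i ∧ c.2.toNat = j
  · obtain ⟨rfl, rfl⟩ := hij
    rw [if_pos ⟨rfl, rfl⟩, hcell, if_neg (by rw [hc1]; rintro ⟨hv, -⟩; exact hc hv),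
      if_pos ⟨by rw [hc1]; exact (PySem.Set.mem_add V c c).2 (Or.inr rfl),
        by rw [hc1]; exact fun hm => hc (hVs _ hm)⟩]
  · rw [if_neg hij, hcell]
    have hne : ((i : Int), (j : Int)) ≠ c := by
      intro he
      exact hij ⟨by rw [← he]; simp, by rw [← he]; simp⟩
    by_cases hcond : ((i : Int), (j : Int)) ∈ V ∧ ((i : Int), (j : Int)) ∉ Vs
    · rw [if_pos hcond, if_pos ⟨(PySem.Set.mem_add _ _ _).2 (Or.inl hcond.1), hcond.2⟩]
    · rw [if_neg hcond, if_neg]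
      rintro ⟨hmem, hns⟩
      rcases (PySem.Set.mem_add _ _ _).1 hmem with hv | he
      · exact hcond ⟨hv, hns⟩
      · exact hne he

lemma pvIsValid_iff {gs Vs repl G V} (char : String)
    (hinv : pvGridInv gs Vs repl G V) (x y : Int) :
    pvIsValid G V x y char = true ↔ (pvOk gs char (x, y) ∧ (x, y) ∉ V) := by
  obtain ⟨hlen, hrow, hcell⟩ := hinv
  have hhead : ((G.headD []).length : Int) = ((gs.headD []).length : Int) := by
    rw [pvHead_len, pvHead_len, hrow 0]
  unfold pvIsValid
  simp only [Bool.and_eq_true, decide_eq_true_eq, beq_iff_eq, Bool.not_eq_eq_eq_not,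
    Bool.not_true, Bool.not_eq_true']
  constructor
  · rintro ⟨⟨⟨⟨⟨hx, hxl⟩, hy⟩, hyl⟩, hval⟩, hcont⟩
    have hnv : (x, y) ∉ V := fun hm => by
      rw [(PySem.Set.contains_iff V (x, y)).2 hm] at hcont; cases hcont
    refine ⟨⟨hx, by omega, hy, by omega, ?_⟩, hnv⟩
    rw [← hval, pvGetCell_eq _ _ _ hx hy, pvGetCell_eq _ _ _ hx hy, hcell]
    rw [if_neg]
    rintro ⟨hv, -⟩
    have : ((x.toNat : Int), (y.toNat : Int)) = (x, y) := by
      ext <;> simp [Int.toNat_of_nonneg hx, Int.toNat_of_nonneg hy]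
    rw [this] at hv
    exact hnv hv
  · rintro ⟨⟨hx, hxl, hy, hyl, hval⟩, hnv⟩
    have hcont : PySem.Set.contains V (x, y) = false := by
      cases hc : PySem.Set.contains V (x, y)
      · rfl
      · exact absurd ((PySem.Set.contains_iff V (x, y)).1 hc) hnv
    refine ⟨⟨⟨⟨⟨hx, by omega⟩, hy⟩, by omega⟩, ?_⟩, hcont⟩
    rw [pvGetCell_eq _ _ _ hx hy, ← pvGetCell_eq _ _ _ hx hy, ← hval,
      pvGetCell_eq _ _ _ hx hy, pvGetCell_eq _ _ _ hx hy, hcell]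
    rw [if_neg]
    rintro ⟨hv, -⟩
    have : ((x.toNat : Int), (y.toNat : Int)) = (x, y) := by
      ext <;> simp [Int.toNat_of_nonneg hx, Int.toNat_of_nonneg hy]
    rw [this] at hv
    exact hnv hv

lemma pvGrid_ext (G H : List (List String)) (hl : G.length = H.length)
    (hr : ∀ i, pvRowLen G i = pvRowLen H i) (hc : ∀ i j, pvCellAt G i j = pvCellAt H i j) :
    G = H := by
  apply List.ext_getElem?
  intro i
  have hrl := hr i
  cases hG : G[i]? with
  | none =>
    cases hH : H[i]? with
    | none => rfl
    | some t => simp [pvRowLen, hG, hH] at hrl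
  | some r =>
    cases hH : H[i]? with
    | none => simp [pvRowLen, hG, hH] at hrl
    | some t =>
      simp only [pvRowLen, hG, hH, Option.map_some, Option.some_inj] at hrl
      congr 1
      apply List.ext_getElem?
      intro j
      have := hc i j
      simpa [pvCellAt, hG, hH] using this

-- ---- DFS characterization ----

lemma pvAdj_iff (s n : Int × Int) :
    pvAdj s n ↔ n ∈ [(s.1 - 1, s.2), (s.1 + 1, s.2), (s.1, s.2 - 1), (s.1, s.2 + 1)] := by
  simp [pvAdj]

lemma pvDfsFold_post (gs : List (List String)) (char repl : String) (Vs : List (Int × Int))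
    (fuel : Nat)
    (IH : ∀ (V : List (Int × Int)) (G : List (List String)) (x y : Int),
      pvU gs V ≤ fuel → pvOk gs char (x, y) → (x, y) ∉ V →
      (∀ c ∈ Vs, c ∈ V) → pvGridInv gs Vs repl G V →
      (∀ c ∈ V, c ∈ (pvDfs char repl fuel x y V G).1) ∧
      (x, y) ∈ (pvDfs char repl fuel x y V G).1 ∧
      (∀ d ∈ (pvDfs char repl fuel x y V G).1, d ∈ V ∨ pvReach gs char V (x, y) d) ∧
      (∀ d ∈ (pvDfs char repl fuel x y V G).1, d ∉ V →
        ∀ n, pvAdj d n → pvOk gs char n → n ∉ V → n ∈ (pvDfs char repl fuel x y V G).1) ∧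
      pvGridInv gs Vs repl (pvDfs char repl fuel x y V G).2 (pvDfs char repl fuel x y V G).1)
    (V : List (Int × Int)) (s : Int × Int) (hsv : s ∉ V) (hVs : ∀ c ∈ Vs, c ∈ V)
    (hufuel : pvU gs (PySem.Set.add V s) ≤ fuel) :
    ∀ (ns : List (Int × Int)) (st : PySem.Set (Int × Int) × List (List String)),
      (∀ n ∈ ns, pvAdj s n) →
      (∀ c ∈ PySem.Set.add V s, c ∈ st.1) →
      (∀ d ∈ st.1, d ∈ V ∨ pvReach gs char V s d) →
      (∀ d ∈ st.1, d ∉ V → d ≠ s → ∀ n, pvAdj d n → pvOk gs char n → n ∉ V → n ∈ st.1) →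
      pvGridInv gs Vs repl st.2 st.1 →
      (∀ c ∈ st.1,
        c ∈ (ns.foldl (fun (st : PySem.Set (Int × Int) × List (List String)) n =>
          if decide (0 ≤ n.1) && decide (n.1 < (st.2.length : Int)) && decide (0 ≤ n.2)
              && decide (n.2 < ((st.2.headD []).length : Int))
              && (pvGetCell st.2 n.1 n.2 == char) && !(PySem.Set.contains st.1 n) then
            pvDfs char repl fuel n.1 n.2 st.1 st.2
          else st) st).1) ∧
      (∀ d ∈ (ns.foldl (fun (st : PySem.Set (Int × Int) × List (List String)) n =>
          if decide (0 ≤ n.1) && decide (n.1 < (st.2.length : Int)) && decide (0 ≤ n.2)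
              && decide (n.2 < ((st.2.headD []).length : Int))
              && (pvGetCell st.2 n.1 n.2 == char) && !(PySem.Set.contains st.1 n) then
            pvDfs char repl fuel n.1 n.2 st.1 st.2
          else st) st).1, d ∈ V ∨ pvReach gs char V s d) ∧
      (∀ d ∈ (ns.foldl (fun (st : PySem.Set (Int × Int) × List (List String)) n =>
          if decide (0 ≤ n.1) && decide (n.1 < (st.2.length : Int)) && decide (0 ≤ n.2)
              && decide (n.2 < ((st.2.headD []).length : Int))
              && (pvGetCell st.2 n.1 n.2 == char) && !(PySem.Set.contains st.1 n) then
            pvDfs char repl fuel n.1 n.2 st.1 st.2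
          else st) st).1, d ∉ V → d ≠ s →
        ∀ n, pvAdj d n → pvOk gs char n → n ∉ V →
          n ∈ (ns.foldl (fun (st : PySem.Set (Int × Int) × List (List String)) n =>
          if decide (0 ≤ n.1) && decide (n.1 < (st.2.length : Int)) && decide (0 ≤ n.2)
              && decide (n.2 < ((st.2.headD []).length : Int))
              && (pvGetCell st.2 n.1 n.2 == char) && !(PySem.Set.contains st.1 n) then
            pvDfs char repl fuel n.1 n.2 st.1 st.2
          else st) st).1) ∧
      (∀ n ∈ ns, pvOk gs char n → n ∉ V →
        n ∈ (ns.foldl (fun (st : PySem.Set (Int × Int) × List (List String)) n =>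
          if decide (0 ≤ n.1) && decide (n.1 < (st.2.length : Int)) && decide (0 ≤ n.2)
              && decide (n.2 < ((st.2.headD []).length : Int))
              && (pvGetCell st.2 n.1 n.2 == char) && !(PySem.Set.contains st.1 n) then
            pvDfs char repl fuel n.1 n.2 st.1 st.2
          else st) st).1) ∧
      pvGridInv gs Vs repl
        (ns.foldl (fun (st : PySem.Set (Int × Int) × List (List String)) n =>
          if decide (0 ≤ n.1) && decide (n.1 < (st.2.length : Int)) && decide (0 ≤ n.2)
              && decide (n.2 < ((st.2.headD []).length : Int))
              && (pvGetCell st.2 n.1 n.2 == char) && !(PySem.Set.contains st.1 n) then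
            pvDfs char repl fuel n.1 n.2 st.1 st.2
          else st) st).2
        (ns.foldl (fun (st : PySem.Set (Int × Int) × List (List String)) n =>
          if decide (0 ≤ n.1) && decide (n.1 < (st.2.length : Int)) && decide (0 ≤ n.2)
              && decide (n.2 < ((st.2.headD []).length : Int))
              && (pvGetCell st.2 n.1 n.2 == char) && !(PySem.Set.contains st.1 n) then
            pvDfs char repl fuel n.1 n.2 st.1 st.2
          else st) st).1 := by
  intro ns
  induction ns with
  | nil =>
    intro st hadj h1 h2 h3 hinv
    exact ⟨fun c hc => hc, h2, fun d hd hdv hds => h3 d hd hdv hds, by simp, hinv⟩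
  | cons n ns ihns =>
    intro st hadj h1 h2 h3 hinv
    simp only [List.foldl_cons]
    have hVsub : ∀ c : Int × Int, c ∈ V → c ∈ st.1 :=
      fun c hc => h1 c ((PySem.Set.mem_add V s c).2 (Or.inl hc))
    by_cases hg : (decide (0 ≤ n.1) && decide (n.1 < (st.2.length : Int)) && decide (0 ≤ n.2)
        && decide (n.2 < ((st.2.headD []).length : Int))
        && (pvGetCell st.2 n.1 n.2 == char) && !(PySem.Set.contains st.1 n)) = true
    · rw [if_pos hg]
      have hgi : pvIsValid st.2 st.1 n.1 n.2 char = true := hg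
      obtain ⟨hok, hnst⟩ := (pvIsValid_iff char hinv n.1 n.2).1 hgi
      have hnV : n ∉ V := fun hv => hnst (hVsub n hv)
      have hu : pvU gs st.1 ≤ fuel := le_trans (pvU_anti gs h1) hufuel
      have hVsSub : ∀ c ∈ Vs, c ∈ st.1 := fun c hc => hVsub c (hVs c hc)
      obtain ⟨m1, m2, m3, m4, m5⟩ := IH st.1 st.2 n.1 n.2 hu hok hnst hVsSub hinv
      have hstsub : ∀ c : Int × Int, c ∈ st.1 → c ∈ (pvDfs char repl fuel n.1 n.2 st.1 st.2).1 :=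
        fun c hc => m1 c hc
      have h1' : ∀ c ∈ PySem.Set.add V s, c ∈ (pvDfs char repl fuel n.1 n.2 st.1 st.2).1 :=
        fun c hc => hstsub c (h1 c hc)
      have h2' : ∀ d ∈ (pvDfs char repl fuel n.1 n.2 st.1 st.2).1,
          d ∈ V ∨ pvReach gs char V s d := by
        intro d hd
        rcases m3 d hd with hdst | hr
        · exact h2 d hdst
        · refine Or.inr (pvReach_prepend (hadj n List.mem_cons_self) hok hnV ?_)
          exact pvReach_anti hVsub hr
      have h3' : ∀ d ∈ (pvDfs char repl fuel n.1 n.2 st.1 st.2).1, d ∉ V → d ≠ s →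
          ∀ nb, pvAdj d nb → pvOk gs char nb → nb ∉ V →
            nb ∈ (pvDfs char repl fuel n.1 n.2 st.1 st.2).1 := by
        intro d hd hdv hds nb hbadj hbok hbv
        by_cases hdst : d ∈ st.1
        · exact hstsub nb (h3 d hdst hdv hds nb hbadj hbok hbv)
        · by_cases hbst : nb ∈ st.1
          · exact hstsub nb hbst
          · exact m4 d hd hdst nb hbadj hbok hbst
      obtain ⟨f1, f2, f3, f4, f5⟩ :=
        ihns _ (fun m hm => hadj m (List.mem_cons_of_mem _ hm)) h1' h2' h3' m5
      refine ⟨fun c hc => f1 c (hstsub c hc), f2, f3, ?_, f5⟩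
      intro nb hnb hbok hbv
      rcases List.mem_cons.1 hnb with rfl | htail
      · exact f1 nb (m2)
      · exact f4 nb htail hbok hbv
    · rw [if_neg hg]
      obtain ⟨f1, f2, f3, f4, f5⟩ :=
        ihns st (fun m hm => hadj m (List.mem_cons_of_mem _ hm)) h1 h2 h3 hinv
      refine ⟨f1, f2, f3, ?_, f5⟩
      intro nb hnb hbok hbv
      rcases List.mem_cons.1 hnb with rfl | htail
      · have : nb ∈ st.1 := by
          by_contra hnst
          exact hg ((pvIsValid_iff char hinv nb.1 nb.2).2 ⟨hbok, hnst⟩)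
        exact f1 nb this
      · exact f4 nb htail hbok hbv

lemma pvDfs_post (gs : List (List String)) (char repl : String) (Vs : List (Int × Int)) :
    ∀ (fuel : Nat) (V : List (Int × Int)) (G : List (List String)) (x y : Int),
      pvU gs V ≤ fuel →
      pvOk gs char (x, y) → (x, y) ∉ V →
      (∀ c ∈ Vs, c ∈ V) → pvGridInv gs Vs repl G V →
      (∀ c ∈ V, c ∈ (pvDfs char repl fuel x y V G).1) ∧
      (x, y) ∈ (pvDfs char repl fuel x y V G).1 ∧
      (∀ d ∈ (pvDfs char repl fuel x y V G).1, d ∈ V ∨ pvReach gs char V (x, y) d) ∧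
      (∀ d ∈ (pvDfs char repl fuel x y V G).1, d ∉ V →
        ∀ n, pvAdj d n → pvOk gs char n → n ∉ V → n ∈ (pvDfs char repl fuel x y V G).1) ∧
      pvGridInv gs Vs repl (pvDfs char repl fuel x y V G).2 (pvDfs char repl fuel x y V G).1 := by
  intro fuel
  induction fuel with
  | zero =>
    intro V G x y hu ho hv hVs hinv
    exfalso
    have hmem : (x, y) ∈ pvAllCells gs := (pvMem_allCells gs (x, y)).2
      ⟨ho.1, ho.2.1, ho.2.2.1, ho.2.2.2.1⟩
    have : (x, y) ∈ (pvAllCells gs).filter (fun c => decide (c ∉ V)) :=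
      List.mem_filter.2 ⟨hmem, by simpa using hv⟩
    have hpos : 0 < pvU gs V := List.length_pos_of_mem this
    omega
  | succ fuel ih =>
    intro V G x y hu ho hv hVs hinv
    have h0x : 0 ≤ x := ho.1
    have h0y : 0 ≤ y := ho.2.2.1
    have hmem : (x, y) ∈ pvAllCells gs := (pvMem_allCells gs (x, y)).2
      ⟨ho.1, ho.2.1, ho.2.2.1, ho.2.2.2.1⟩
    have hult : pvU gs (PySem.Set.add V (x, y)) < pvU gs V := pvU_lt gs hmem hv
    have hufuel : pvU gs (PySem.Set.add V (x, y)) ≤ fuel := by omega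
    have hinv0 : pvGridInv gs Vs repl (pvSetCell G x y repl) (PySem.Set.add V (x, y)) :=
      pvGridInv_add hinv hVs hv h0x h0y
    have hfold := pvDfsFold_post gs char repl Vs fuel ih V (x, y) hv hVs hufuel
      [(x - 1, y), (x + 1, y), (x, y - 1), (x, y + 1)]
      (PySem.Set.add V (x, y), pvSetCell G x y repl)
      (by intro n hn; rw [pvAdj_iff]; exact hn)
      (fun c hc => hc)
      (by
        intro d hd
        rcases (PySem.Set.mem_add V (x, y) d).1 hd with hdv | rfl
        · exact Or.inl hdv
        · exact Or.inr (.refl _))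
      (by
        intro d hd hdv hds
        rcases (PySem.Set.mem_add V (x, y) d).1 hd with hdv2 | rfl
        · exact absurd hdv2 hdv
        · exact absurd rfl hds)
      hinv0
    obtain ⟨f1, f2, f3, f4, f5⟩ := hfold
    simp only [pvDfs]
    refine ⟨?_, ?_, f2, ?_, f5⟩
    · intro c hc
      exact f1 c ((PySem.Set.mem_add V (x, y) c).2 (Or.inl hc))
    · exact f1 (x, y) ((PySem.Set.mem_add V (x, y) (x, y)).2 (Or.inr rfl))
    · intro d hd hdv n hn hok hnv
      by_cases hds : d = (x, y)
      · subst hds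
        exact f4 n ((pvAdj_iff (x, y) n).1 hn) hok hnv
      · exact f3 d hd hdv hds n hn hok hnv

-- ---- BFS characterization ----

def pvBfsStep (char repl : String) (c : Int × Int)
    (st : List (Int × Int) × PySem.Set (Int × Int) × List (List String)) (d : Int × Int) :
    List (Int × Int) × PySem.Set (Int × Int) × List (List String) :=
  if pvIsValid st.2.2 st.2.1 (c.1 + d.1) (c.2 + d.2) char then
    (st.1 ++ [(c.1 + d.1, c.2 + d.2)], PySem.Set.add st.2.1 (c.1 + d.1, c.2 + d.2),
      pvSetCell st.2.2 (c.1 + d.1) (c.2 + d.2) repl)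
  else st

lemma pvBfsLoop_succ_cons (char repl : String) (fuel : Nat) (c : Int × Int)
    (queue : List (Int × Int)) (V : PySem.Set (Int × Int)) (G : List (List String)) :
    pvBfsLoop char repl (fuel + 1) (c :: queue) V G =
      pvBfsLoop char repl fuel
        (([((-1 : Int), (0 : Int)), (1, 0), (0, -1), (0, 1)].foldl (pvBfsStep char repl c)
          (queue, V, G)).1)
        (([((-1 : Int), (0 : Int)), (1, 0), (0, -1), (0, 1)].foldl (pvBfsStep char repl c)
          (queue, V, G)).2.1)
        (([((-1 : Int), (0 : Int)), (1, 0), (0, -1), (0, 1)].foldl (pvBfsStep char repl c)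
          (queue, V, G)).2.2) := rfl

lemma pvAdj_exists_dir (c n : Int × Int) (h : pvAdj c n) :
    ∃ dd ∈ [((-1 : Int), (0 : Int)), (1, 0), (0, -1), (0, 1)],
      n = (c.1 + dd.1, c.2 + dd.2) := by
  rcases h with h | h | h | h
  · exact ⟨(-1, 0), by simp, by rw [h]; ext <;> simp <;> ring⟩
  · exact ⟨(1, 0), by simp, by rw [h]; ext <;> simp⟩
  · exact ⟨(0, -1), by simp, by rw [h]; ext <;> simp <;> ring⟩
  · exact ⟨(0, 1), by simp, by rw [h]; ext <;> simp⟩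

lemma pvAdj_of_dir (c dd : Int × Int)
    (hdd : dd ∈ [((-1 : Int), (0 : Int)), (1, 0), (0, -1), (0, 1)]) :
    pvAdj c (c.1 + dd.1, c.2 + dd.2) := by
  fin_cases hdd
  · exact Or.inl (by refine Prod.ext ?_ ?_ <;> dsimp <;> ring)
  · exact Or.inr (Or.inl (by refine Prod.ext ?_ ?_ <;> dsimp <;> ring))
  · exact Or.inr (Or.inr (Or.inl (by refine Prod.ext ?_ ?_ <;> dsimp <;> ring)))
  · exact Or.inr (Or.inr (Or.inr (by refine Prod.ext ?_ ?_ <;> dsimp <;> ring)))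

lemma pvBfsFold_post (gs : List (List String)) (char repl : String) (Vs : List (Int × Int))
    (s c : Int × Int) (N : Nat) (hc : pvReach gs char Vs s c) :
    ∀ (ds : List (Int × Int))
      (st : List (Int × Int) × PySem.Set (Int × Int) × List (List String)),
      (∀ dd ∈ ds, pvAdj c (c.1 + dd.1, c.2 + dd.2)) →
      st.1.length + pvU gs st.2.1 ≤ N →
      (∀ q ∈ st.1, q ∈ st.2.1 ∧ pvReach gs char Vs s q) →
      (∀ d ∈ st.2.1, d ∈ Vs ∨ pvReach gs char Vs s d) →
      (∀ d ∈ st.2.1, d ∉ Vs →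
        d = c ∨ d ∈ st.1 ∨ ∀ n, pvAdj d n → pvOk gs char n → n ∉ Vs → n ∈ st.2.1) →
      (∀ x ∈ Vs, x ∈ st.2.1) →
      pvGridInv gs Vs repl st.2.2 st.2.1 →
      (ds.foldl (pvBfsStep char repl c) st).1.length +
          pvU gs (ds.foldl (pvBfsStep char repl c) st).2.1 ≤ N ∧
      (∀ q ∈ (ds.foldl (pvBfsStep char repl c) st).1,
        q ∈ (ds.foldl (pvBfsStep char repl c) st).2.1 ∧ pvReach gs char Vs s q) ∧
      (∀ d ∈ (ds.foldl (pvBfsStep char repl c) st).2.1, d ∈ Vs ∨ pvReach gs char Vs s d) ∧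
      (∀ d ∈ (ds.foldl (pvBfsStep char repl c) st).2.1, d ∉ Vs →
        d = c ∨ d ∈ (ds.foldl (pvBfsStep char repl c) st).1 ∨
          ∀ n, pvAdj d n → pvOk gs char n → n ∉ Vs →
            n ∈ (ds.foldl (pvBfsStep char repl c) st).2.1) ∧
      (∀ x ∈ Vs, x ∈ (ds.foldl (pvBfsStep char repl c) st).2.1) ∧
      pvGridInv gs Vs repl (ds.foldl (pvBfsStep char repl c) st).2.2
        (ds.foldl (pvBfsStep char repl c) st).2.1 ∧
      (∀ q ∈ st.1, q ∈ (ds.foldl (pvBfsStep char repl c) st).1) ∧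
      (∀ d ∈ st.2.1, d ∈ (ds.foldl (pvBfsStep char repl c) st).2.1) ∧
      (∀ dd ∈ ds, pvOk gs char (c.1 + dd.1, c.2 + dd.2) →
        (c.1 + dd.1, c.2 + dd.2) ∈ (ds.foldl (pvBfsStep char repl c) st).2.1) := by
  intro ds
  induction ds with
  | nil =>
    intro st hadj hN k1 k2 k3 kVs hinv
    exact ⟨hN, k1, k2, k3, kVs, hinv, fun q hq => hq, fun d hd => hd, by simp⟩
  | cons dd ds ihds =>
    intro st hadj hN k1 k2 k3 kVs hinv
    simp only [List.foldl_cons]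
    by_cases hg : pvIsValid st.2.2 st.2.1 (c.1 + dd.1) (c.2 + dd.2) char = true
    · have hstep : pvBfsStep char repl c st dd =
          (st.1 ++ [(c.1 + dd.1, c.2 + dd.2)], PySem.Set.add st.2.1 (c.1 + dd.1, c.2 + dd.2),
            pvSetCell st.2.2 (c.1 + dd.1) (c.2 + dd.2) repl) := by
        rw [pvBfsStep, if_pos hg]
      obtain ⟨hok, hnv⟩ := (pvIsValid_iff char hinv (c.1 + dd.1) (c.2 + dd.2)).1 hg
      have hnVs : (c.1 + dd.1, c.2 + dd.2) ∉ Vs := fun hm => hnv (kVs _ hm)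
      have hreach : pvReach gs char Vs s (c.1 + dd.1, c.2 + dd.2) :=
        .step hc (hadj dd List.mem_cons_self) hok hnVs
      have hmemall : (c.1 + dd.1, c.2 + dd.2) ∈ pvAllCells gs :=
        (pvMem_allCells gs _).2 ⟨hok.1, hok.2.1, hok.2.2.1, hok.2.2.2.1⟩
      have hult : pvU gs (PySem.Set.add st.2.1 (c.1 + dd.1, c.2 + dd.2)) < pvU gs st.2.1 :=
        pvU_lt gs hmemall hnv
      rw [hstep]
      obtain ⟨f0, f1, f2, f3, f4, f5, f6, f7, f8⟩ := ihds
        (st.1 ++ [(c.1 + dd.1, c.2 + dd.2)], PySem.Set.add st.2.1 (c.1 + dd.1, c.2 + dd.2),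
          pvSetCell st.2.2 (c.1 + dd.1) (c.2 + dd.2) repl)
        (fun m hm => hadj m (List.mem_cons_of_mem _ hm))
        (by simp only [List.length_append, List.length_cons, List.length_nil]; omega)
        (by
          intro q hq
          rcases List.mem_append.1 hq with hq | hq
          · obtain ⟨hq1, hq2⟩ := k1 q hq
            exact ⟨(PySem.Set.mem_add _ _ _).2 (Or.inl hq1), hq2⟩
          · rcases List.mem_singleton.1 hq with rfl
            exact ⟨(PySem.Set.mem_add _ _ _).2 (Or.inr rfl), hreach⟩)
        (by
          intro d hd
          rcases (PySem.Set.mem_add _ _ _).1 hd with hd | rfl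
          · exact k2 d hd
          · exact Or.inr hreach)
        (by
          intro d hd hdVs
          rcases (PySem.Set.mem_add _ _ _).1 hd with hd | rfl
          · rcases k3 d hd hdVs with h | h | h
            · exact Or.inl h
            · exact Or.inr (Or.inl (List.mem_append.2 (Or.inl h)))
            · exact Or.inr (Or.inr (fun n hn hon hnn =>
                (PySem.Set.mem_add _ _ _).2 (Or.inl (h n hn hon hnn))))
          · exact Or.inr (Or.inl (List.mem_append.2 (Or.inr (List.mem_singleton.2 rfl)))))
        (fun x hx => (PySem.Set.mem_add _ _ _).2 (Or.inl (kVs x hx)))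
        (pvGridInv_add hinv kVs hnv hok.1 hok.2.2.1)
      refine ⟨f0, f1, f2, f3, f4, f5, ?_, ?_, ?_⟩
      · exact fun q hq => f6 q (List.mem_append.2 (Or.inl hq))
      · exact fun d hd => f7 d ((PySem.Set.mem_add _ _ _).2 (Or.inl hd))
      · intro ee hee hoke
        rcases List.mem_cons.1 hee with rfl | htail
        · exact f7 _ ((PySem.Set.mem_add _ _ _).2 (Or.inr rfl))
        · exact f8 ee htail hoke
    · have hstep : pvBfsStep char repl c st dd = st := by
        rw [pvBfsStep, if_neg hg]
      rw [hstep]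
      obtain ⟨f0, f1, f2, f3, f4, f5, f6, f7, f8⟩ :=
        ihds st (fun m hm => hadj m (List.mem_cons_of_mem _ hm)) hN k1 k2 k3 kVs hinv
      refine ⟨f0, f1, f2, f3, f4, f5, f6, f7, ?_⟩
      intro ee hee hoke
      rcases List.mem_cons.1 hee with rfl | htail
      · have : (c.1 + ee.1, c.2 + ee.2) ∈ st.2.1 := by
          by_contra hnm
          exact hg ((pvIsValid_iff char hinv _ _).2 ⟨hoke, hnm⟩)
        exact f7 _ this
      · exact f8 ee htail hoke

lemma pvBfsLoop_post (gs : List (List String)) (char repl : String) (Vs : List (Int × Int))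
    (s : Int × Int) :
    ∀ (fuel : Nat) (Q : List (Int × Int)) (V : List (Int × Int)) (G : List (List String)),
      Q.length + pvU gs V ≤ fuel →
      (∀ q ∈ Q, q ∈ V ∧ pvReach gs char Vs s q) →
      (∀ d ∈ V, d ∈ Vs ∨ pvReach gs char Vs s d) →
      (∀ d ∈ V, d ∉ Vs → d ∈ Q ∨ ∀ n, pvAdj d n → pvOk gs char n → n ∉ Vs → n ∈ V) →
      (∀ c ∈ Vs, c ∈ V) → pvGridInv gs Vs repl G V →
      (∀ c ∈ V, c ∈ (pvBfsLoop char repl fuel Q V G).1) ∧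
      (∀ d ∈ (pvBfsLoop char repl fuel Q V G).1, d ∈ Vs ∨ pvReach gs char Vs s d) ∧
      (∀ d ∈ (pvBfsLoop char repl fuel Q V G).1, d ∉ Vs →
        ∀ n, pvAdj d n → pvOk gs char n → n ∉ Vs → n ∈ (pvBfsLoop char repl fuel Q V G).1) ∧
      pvGridInv gs Vs repl (pvBfsLoop char repl fuel Q V G).2 (pvBfsLoop char repl fuel Q V G).1 := by
  intro fuel
  induction fuel with
  | zero =>
    intro Q V G hN j1 j2 j3 jVs hinv
    have hQ : Q = [] := List.eq_nil_of_length_eq_zero (by omega)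
    subst hQ
    refine ⟨fun c hcv => hcv, j2, ?_, hinv⟩
    intro d hd hdVs n hn hon hnv
    rcases j3 d hd hdVs with h | h
    · cases h
    · exact h n hn hon hnv
  | succ fuel ih =>
    intro Q V G hN j1 j2 j3 jVs hinv
    cases Q with
    | nil =>
      refine ⟨fun c hcv => hcv, j2, ?_, hinv⟩
      intro d hd hdVs n hn hon hnv
      rcases j3 d hd hdVs with h | h
      · cases h
      · exact h n hn hon hnv
    | cons c Qt =>
      obtain ⟨hcV, hcR⟩ := j1 c List.mem_cons_self
      rw [pvBfsLoop_succ_cons]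
      obtain ⟨f0, f1, f2, f3, f4, f5, f6, f7, f8⟩ :=
        pvBfsFold_post gs char repl Vs s c fuel hcR
          [((-1 : Int), (0 : Int)), (1, 0), (0, -1), (0, 1)] (Qt, V, G)
          (fun dd hdd => pvAdj_of_dir c dd hdd)
          (by simp at hN ⊢; omega)
          (fun q hq => j1 q (List.mem_cons_of_mem _ hq))
          j2
          (by
            intro d hd hdVs
            rcases j3 d hd hdVs with h | h
            · rcases List.mem_cons.1 h with rfl | h2
              · exact Or.inl rfl
              · exact Or.inr (Or.inl h2)
            · exact Or.inr (Or.inr h))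
          jVs hinv
      have hclosec : ∀ n, pvAdj c n → pvOk gs char n → n ∉ Vs →
          n ∈ ([((-1 : Int), (0 : Int)), (1, 0), (0, -1), (0, 1)].foldl
            (pvBfsStep char repl c) (Qt, V, G)).2.1 := by
        intro n hn hon hnVs
        obtain ⟨dd, hdd, rfl⟩ := pvAdj_exists_dir c n hn
        exact f8 dd hdd hon
      obtain ⟨g1, g2, g3, g4⟩ := ih _ _ _ f0 f1 f2
        (by
          intro d hd hdVs
          rcases f3 d hd hdVs with rfl | h | h
          · exact Or.inr hclosec
          · exact Or.inl h
          · exact Or.inr h)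
        f4 f5
      exact ⟨fun cv hcv => g1 cv (f7 cv hcv), g2, g3, g4⟩

-- ---- both fills satisfy pvFillSpec ----

lemma pvFloodFill_spec (G : List (List String)) (V : List (Int × Int)) (char repl : String)
    (x y : Int) (ho : pvOk G char (x, y)) (hv : (x, y) ∉ V) :
    pvFillSpec V G char repl (x, y) (pvFloodFill x y char repl V G) := by
  have h0x : 0 ≤ x := ho.1
  have h0y : 0 ≤ y := ho.2.2.1
  have hinv0 : pvGridInv G V repl (pvSetCell G x y repl) (PySem.Set.add V (x, y)) :=
    pvGridInv_add (pvGridInv_self G V repl) (fun _ hx => hx) hv h0x h0y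
  have hfuel : ([(x, y)] : List (Int × Int)).length + pvU G (PySem.Set.add V (x, y)) ≤
      G.length * (G.headD []).length + 1 := by
    have := pvU_le G (PySem.Set.add V (x, y))
    simp only [List.length_cons, List.length_nil]
    omega
  obtain ⟨p1, p2, p3, p4⟩ := pvBfsLoop_post G char repl V (x, y)
    (G.length * (G.headD []).length + 1) [(x, y)] (PySem.Set.add V (x, y))
    (pvSetCell G x y repl) hfuel
    (by
      intro q hq
      rcases List.mem_singleton.1 hq with rfl
      exact ⟨(PySem.Set.mem_add _ _ _).2 (Or.inr rfl), .refl _⟩)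
    (by
      intro d hd
      rcases (PySem.Set.mem_add _ _ _).1 hd with hd | rfl
      · exact Or.inl hd
      · exact Or.inr (.refl _))
    (by
      intro d hd hdVs
      rcases (PySem.Set.mem_add _ _ _).1 hd with hd | rfl
      · exact absurd hd hdVs
      · exact Or.inl (List.mem_singleton.2 rfl))
    (fun c hcv => (PySem.Set.mem_add _ _ _).2 (Or.inl hcv))
    hinv0
  refine ⟨?_, p4⟩
  intro cc
  constructor
  · intro hcc
    exact p2 cc hcc
  · rintro (h | h)
    · exact p1 cc ((PySem.Set.mem_add _ _ _).2 (Or.inl h))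
    · exact (pvReach_subset_of_closed (p1 _ ((PySem.Set.mem_add _ _ _).2 (Or.inr rfl))) hv p3
        cc h).1

lemma pvDfsFill_spec (G : List (List String)) (V : List (Int × Int)) (char repl : String)
    (x y : Int) (ho : pvOk G char (x, y)) (hv : (x, y) ∉ V) :
    pvFillSpec V G char repl (x, y)
      (pvDfs char repl (G.length * (G.headD []).length + 1) x y V G) := by
  have hu : pvU G V ≤ G.length * (G.headD []).length + 1 := by
    have := pvU_le G V; omega
  obtain ⟨m1, m2, m3, m4, m5⟩ := pvDfs_post G char repl V
    (G.length * (G.headD []).length + 1) V G x y hu ho hv (fun _ hx => hx)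
    (pvGridInv_self G V repl)
  refine ⟨?_, m5⟩
  intro cc
  constructor
  · intro hcc
    exact m3 cc hcc
  · rintro (h | h)
    · exact m1 cc h
    · exact (pvReach_subset_of_closed m2 hv m4 cc h).1

-- ---- two fills from related states give related results ----

lemma pvFill_eq {VA VB : List (Int × Int)} {G : List (List String)} {char repl : String}
    {s : Int × Int} {rA rB : List (Int × Int) × List (List String)}
    (hV : ∀ c : Int × Int, c ∈ VA ↔ c ∈ VB)
    (hA : pvFillSpec VA G char repl s rA) (hB : pvFillSpec VB G char repl s rB) :
    (∀ c : Int × Int, c ∈ rA.1 ↔ c ∈ rB.1) ∧ rA.2 = rB.2 := by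
  have hmem : ∀ c : Int × Int, c ∈ rA.1 ↔ c ∈ rB.1 := by
    intro c
    rw [hA.1 c, hB.1 c, hV c, pvReach_congr hV]
  refine ⟨hmem, pvGrid_ext _ _ ?_ ?_ ?_⟩
  · rw [hA.2.1, hB.2.1]
  · intro i
    rw [hA.2.2.1 i, hB.2.2.1 i]
  · intro i j
    rw [hA.2.2.2 i j, hB.2.2.2 i j]
    exact if_congr (and_congr (hmem _) (not_congr (hV _))) rfl rfl

-- ---- outer loop ----

def pvRel (g0 : List (List String))
    (a b : PySem.Set (Int × Int) × PySem.Dict String Int × List (List String)) : Prop :=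
  (∀ c : Int × Int, c ∈ a.1 ↔ c ∈ b.1) ∧ a.2.1 = b.2.1 ∧ a.2.2 = b.2.2 ∧
    b.2.2.length = g0.length ∧ (∀ i, pvRowLen b.2.2 i = pvRowLen g0 i)

lemma pvBody_rel (g0 : List (List String))
    (a b : PySem.Set (Int × Int) × PySem.Dict String Int × List (List String))
    (hR : pvRel g0 a b) (i j : Int)
    (hi : 0 ≤ i ∧ i < (g0.length : Int))
    (hj : 0 ≤ j ∧ j < ((b.2.2.headD []).length : Int)) :
    pvRel g0 (pvBodyA a i j) (pvBodyB b i j) := by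
  obtain ⟨VA, cA, GA⟩ := a
  obtain ⟨VB, cA, GA⟩ := b
  obtain ⟨hmem, hcnt, hgrid, hlen, hrows⟩ := hR
  dsimp only at hmem hcnt hgrid hlen hrows hj
  subst hcnt hgrid
  have hcont : PySem.Set.contains VA (i, j) = PySem.Set.contains VB (i, j) := by
    by_cases h : (i, j) ∈ VB
    · rw [(PySem.Set.contains_iff _ _).2 h, (PySem.Set.contains_iff _ _).2 ((hmem _).2 h)]
    · have ha : (i, j) ∉ VA := fun hm => h ((hmem _).1 hm)
      cases hca : PySem.Set.contains VA (i, j)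
      · cases hcb : PySem.Set.contains VB (i, j)
        · rfl
        · exact absurd ((PySem.Set.contains_iff _ _).1 hcb) h
      · exact absurd ((PySem.Set.contains_iff _ _).1 hca) ha
  unfold pvBodyA pvBodyB
  dsimp only
  rw [hcont]
  by_cases hb : PySem.Set.contains VB (i, j) = true
  · rw [if_pos hb, if_pos hb]
    exact ⟨hmem, rfl, rfl, hlen, hrows⟩
  · rw [if_neg hb, if_neg hb]
    have hvB : (i, j) ∉ VB := fun hm => hb ((PySem.Set.contains_iff _ _).2 hm)
    have hvA : (i, j) ∉ VA := fun hm => hvB ((hmem _).1 hm)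
    have hdict : (if !(PySem.Dict.contains cA (pvGetCell GA i j)) then
          PySem.Dict.insert cA (pvGetCell GA i j) 1
        else PySem.Dict.insert cA (pvGetCell GA i j)
          (PySem.Dict.getD cA (pvGetCell GA i j) 0 + 1)) =
        PySem.Dict.insert cA (pvGetCell GA i j)
          (PySem.Dict.getD cA (pvGetCell GA i j) 0 + 1) := by
      cases hct : PySem.Dict.contains cA (pvGetCell GA i j)
      · rw [PySem.Dict.getD_of_not_contains cA 0 hct]
        norm_num
      · simp
    rw [hdict]
    have ho : pvOk GA (pvGetCell GA i j) (i, j) := ⟨hi.1, by omega, hj.1, hj.2, rfl⟩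
    have sA := pvFloodFill_spec GA VA (pvGetCell GA i j)
      (if (PySem.Dict.getD (PySem.Dict.insert cA (pvGetCell GA i j)
            (PySem.Dict.getD cA (pvGetCell GA i j) 0 + 1)) (pvGetCell GA i j) 0) == 1 then
          pvGetCell GA i j
        else pvGetCell GA i j ++ PySem.Int.toStr
          (PySem.Dict.getD (PySem.Dict.insert cA (pvGetCell GA i j)
            (PySem.Dict.getD cA (pvGetCell GA i j) 0 + 1)) (pvGetCell GA i j) 0))
      i j ho hvA
    have sB := pvDfsFill_spec GA VB (pvGetCell GA i j)
      (if (PySem.Dict.getD (PySem.Dict.insert cA (pvGetCell GA i j)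
            (PySem.Dict.getD cA (pvGetCell GA i j) 0 + 1)) (pvGetCell GA i j) 0) == 1 then
          pvGetCell GA i j
        else pvGetCell GA i j ++ PySem.Int.toStr
          (PySem.Dict.getD (PySem.Dict.insert cA (pvGetCell GA i j)
            (PySem.Dict.getD cA (pvGetCell GA i j) 0 + 1)) (pvGetCell GA i j) 0))
      i j ho hvB
    obtain ⟨rmem, rgrid⟩ := pvFill_eq hmem sA sB
    have hlen' := sB.2.1
    have hrows' := sB.2.2.1
    exact ⟨rmem, rfl, rgrid, by rw [hlen']; exact hlen,
      fun k => by rw [hrows' k]; exact hrows k⟩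

lemma pvFoldl_rel {α β : Type} (R : α → α → Prop) (f g : α → β → α) (l : List β)
    (h : ∀ a b x, x ∈ l → R a b → R (f a x) (g b x)) :
    ∀ a b, R a b → R (l.foldl f a) (l.foldl g b) := by
  intro a b hab
  induction l generalizing a b with
  | nil => exact hab
  | cons x xs ih => exact ih (fun a b x hx => h a b x (List.mem_cons_of_mem _ hx)) _ _ (h a b x List.mem_cons_self hab)

-- ===== VERDICT (by name: the statement is the Claim_ definition above) =====
theorem make_unique_regions_py_spec : Claim_equal_make_unique_regions_py := by
  intro grid _ _
  unfold Spec_make_unique_regions_py make_unique_regions_py make_unique_regions_py_alt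
  have h := pvFoldl_rel (pvRel grid)
    (fun st i => (PySem.List.pyRange 0 ((st.2.2.headD []).length : Int) 1).foldl
      (fun st' j => pvBodyA st' i j) st)
    (fun st i => (PySem.List.pyRange 0 ((st.2.2.headD []).length : Int) 1).foldl
      (fun st' j => pvBodyB st' i j) st)
    (PySem.List.pyRange 0 grid.length 1)
    (by
      intro a b i hi hab
      have hg : a.2.2 = b.2.2 := hab.2.2.1
      dsimp only
      rw [hg]
      refine pvFoldl_rel (pvRel grid) _ _ _ ?_ a b hab
      intro a' b' jx hjx hab'
      rw [PySem.List.mem_pyRange_one] at hi hjx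
      refine pvBody_rel grid a' b' hab' i jx ⟨hi.1, hi.2⟩ ⟨hjx.1, ?_⟩
      have hhead : ((b.2.2.headD []).length : Int) = ((b'.2.2.headD []).length : Int) := by
        rw [pvHead_len, pvHead_len, hab.2.2.2.2 0, hab'.2.2.2.2 0]
      omega)
    (PySem.Set.empty, PySem.Dict.empty, grid)
    (PySem.Set.empty, PySem.Dict.empty, grid)
    ⟨fun c => Iff.rfl, rfl, rfl, rfl, fun i => rfl⟩
  exact h.2.2.1
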